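-- pv_equiv track=rewrite | github.com/trodrigueza/cyphergusting | library/src/analisisdebrauer.py | create_successor_sequences
-- ===== SOURCE A (Python) =====
-- from collections import defaultdict, Counter
--
-- def create_successor_sequences(lists, M):
--     """
--     Create successor sequences for each character, including self-loops for repeated characters
--     """
--     char_sequences = defaultdict(list)
--     for char in M:
--         # Find all occurrences of the character in each list
--         for idx, lst in enumerate(lists):
--             if char in lst:
--                 char_sequences[char].append(idx)
--                 # If character appears multiple times in same list, add a self-loop
--                 for i in range(1, lst.count(char)):
--                     char_sequences[char].append(idx)
--
--     return char_sequences
-- ===== SOURCE B (Python) =====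
-- from collections import defaultdict
--
-- def create_successor_sequences(lists, M):
--     # Build once: element -> list of source-list indices, one idx per occurrence, in list order.
--     index = defaultdict(list)
--     for idx, lst in enumerate(lists):
--         for elem in lst:
--             index[elem].append(idx)
--     # Project the index through M, preserving duplicate characters in M.
--     result = defaultdict(list)
--     for char in M:
--         if char in index:
--             result[char].extend(index[char])
--     return result
-- ===== Notes on version B (the rewrite author's own statement) =====
-- stated objective: faster
-- what changed: Replaces A's per-character rescanning of every list ('char in lst' plus 'lst.count(char)' for each char of M) with one pass that builds an element-to-indices index over the lists, then a single projection pass over M.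
import Mathlib
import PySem

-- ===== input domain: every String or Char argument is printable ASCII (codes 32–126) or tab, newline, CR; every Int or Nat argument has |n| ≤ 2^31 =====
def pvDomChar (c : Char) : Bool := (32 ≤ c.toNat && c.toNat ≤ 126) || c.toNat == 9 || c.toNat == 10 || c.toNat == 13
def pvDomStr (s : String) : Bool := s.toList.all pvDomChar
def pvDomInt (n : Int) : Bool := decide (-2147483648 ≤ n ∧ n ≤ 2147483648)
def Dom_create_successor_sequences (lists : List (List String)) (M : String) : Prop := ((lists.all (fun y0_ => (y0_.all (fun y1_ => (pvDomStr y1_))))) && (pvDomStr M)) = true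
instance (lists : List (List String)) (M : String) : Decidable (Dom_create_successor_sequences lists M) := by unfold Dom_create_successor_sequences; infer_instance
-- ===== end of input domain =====

-- B builds an element→indices index in one pass over the lists and projects it through M,
-- replacing A's per-character membership/count rescans of every list (objective: faster).


-- ===== PORT A =====
-- for char in M: for idx, lst in enumerate(lists): if char in lst: append idx to
-- char_sequences[char], then append idx once more for each i in range(1, lst.count(char));
-- return the defaultdict (as its items).
def create_successor_sequences (lists : List (List String)) (M : String) : List (String × List Int) :=
  (M.toList.foldl (fun d c =>
    (PySem.List.enumerate lists 0).foldl (fun d p =>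
      if p.2.contains (String.ofList [c]) then
        (PySem.List.pyRange 1 (PySem.List.count p.2 (String.ofList [c]) : Int) 1).foldl
          (fun d _ => d.modify (String.ofList [c]) [] (fun t => t ++ [p.1]))
          (d.modify (String.ofList [c]) [] (fun t => t ++ [p.1]))
      else d) d) (PySem.Dict.empty : PySem.Dict String (List Int))).items

-- ===== PORT B =====
-- index: one pass over enumerate(lists), appending idx once per occurrence of each element;
-- result: one pass over M extending result[char] by index[char] when char is in the index.
def create_successor_sequences_alt (lists : List (List String)) (M : String) : List (String × List Int) :=
  let index : PySem.Dict String (List Int) :=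
    (PySem.List.enumerate lists 0).foldl (fun d p =>
      p.2.foldl (fun d e => d.modify e [] (fun t => t ++ [p.1])) d) PySem.Dict.empty
  (M.toList.foldl (fun r c =>
    if index.contains (String.ofList [c]) then
      r.modify (String.ofList [c]) [] (fun t => t ++ index.getD (String.ofList [c]) [])
    else r)
    (PySem.Dict.empty : PySem.Dict String (List Int))).items

-- ===== PRECONDITION & SPEC =====
def Spec_create_successor_sequences (lists : List (List String)) (M : String) (out : List (String × List Int)) : Prop := out = create_successor_sequences_alt lists M
instance (lists : List (List String)) (M : String) (out : List (String × List Int)) : Decidable (Spec_create_successor_sequences lists M out) := by unfold Spec_create_successor_sequences; infer_instance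

-- ===== CLAIM (what is proved, stated in full; the proofs are below) =====
def Claim_equal_create_successor_sequences : Prop := ∀ (lists : List (List String)) (M : String), Dom_create_successor_sequences lists M → Spec_create_successor_sequences lists M (create_successor_sequences lists M)

-- ===== LEMMAS AND PROOFS =====

-- proof-only abbreviations
def pvK (c : Char) : String := String.ofList [c]

def pvStep (d : PySem.Dict String (List Int)) (q : String × Int) : PySem.Dict String (List Int) :=
  d.modify q.1 [] (fun t => t ++ [q.2])

def pvPairsA (lists : List (List String)) (c : Char) : List (String × Int) :=
  ((PySem.List.enumerate lists 0).filter (fun p => p.2.contains (pvK c))).flatMap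
    (fun p => (pvK c, p.1) :: (PySem.List.pyRange 1 (PySem.List.count p.2 (pvK c) : Int) 1).map (fun _ => (pvK c, p.1)))

def pvPairsI (lists : List (List String)) : List (String × Int) :=
  (PySem.List.enumerate lists 0).flatMap (fun p => p.2.map (fun e => (e, p.1)))

def pvOcc (lists : List (List String)) (s : String) : List Int :=
  (PySem.List.enumerate lists 0).flatMap (fun p => List.replicate (p.2.count s) p.1)

def pvQ (lists : List (List String)) (s : String) : Bool :=
  (PySem.List.enumerate lists 0).any (fun p => p.2.contains s)

-- general facts about modify-append folds and flatMap
theorem pvFold_getD {β : Type} (l : List β) (k : β → String) (v : β → List Int)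
    (d : PySem.Dict String (List Int)) (c : String) :
    (l.foldl (fun d x => PySem.Dict.modify d (k x) [] (fun t => t ++ v x)) d).getD c []
      = d.getD c [] ++ (l.filter (fun x => k x == c)).flatMap v := by
  induction l generalizing d with
  | nil => simp
  | cons x t ih =>
    rw [List.foldl_cons, ih, List.filter_cons]
    by_cases h : k x = c
    · simp [h]
    · have hb : (k x == c) = false := by simpa using h
      have hne : c ≠ k x := fun hc => h hc.symm
      simp [hb, PySem.Dict.getD_modify, hne]

theorem pvFlatMap_filter {β γ : Type} (l : List β) (p : β → Bool) (f : β → List γ) :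
    (l.filter p).flatMap f = l.flatMap (fun x => if p x then f x else []) := by
  induction l with
  | nil => rfl
  | cons x t ih =>
    rw [List.filter_cons, List.flatMap_cons]
    by_cases h : p x = true
    · simp [h, ih]
    · simp only [Bool.not_eq_true] at h
      simp [h, ih]

theorem pvFlatMap_filter_eq {β γ : Type} (l : List β) (p : β → Bool) (f : β → List γ)
    (h : ∀ x ∈ l, p x = false → f x = []) :
    (l.filter p).flatMap f = l.flatMap f := by
  rw [pvFlatMap_filter]
  refine List.flatMap_congr (fun x hx => ?_)
  by_cases hp : p x = true
  · simp [hp]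
  · simp only [Bool.not_eq_true] at hp
    simp [hp, h x hx hp]

theorem pvUpdate_const (t : List String) (s : List String) (a : String)
    (h : ∀ x ∈ t, x = a) :
    PySem.Set.update s t = if t.isEmpty then s else PySem.Set.add s a := by
  induction t generalizing s with
  | nil => rfl
  | cons b t ih =>
    have hb : b = a := h b (by simp)
    have ht : ∀ x ∈ t, x = a := fun x hx => h x (by simp [hx])
    have : PySem.Set.update s (b :: t) = PySem.Set.update (PySem.Set.add s b) t := rfl
    rw [this, ih (PySem.Set.add s b) ht, hb]
    by_cases he : t.isEmpty <;> simp [he]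

theorem pvFlatMap_singleton {β γ : Type} (l : List β) (f : β → γ) :
    l.flatMap (fun x => [f x]) = l.map f := by
  induction l with
  | nil => rfl
  | cons x t ih => simp [ih]

-- keys of pvPairsA blocks are all pvK c
theorem pvPairsA_key (lists : List (List String)) (c : Char) :
    ∀ q ∈ pvPairsA lists c, q.1 = pvK c := by
  intro q hq
  simp only [pvPairsA, List.mem_flatMap] at hq
  obtain ⟨p, _, hq⟩ := hq
  rcases List.mem_cons.mp hq with h | h
  · rw [h]
  · obtain ⟨_, _, h⟩ := List.mem_map.mp h
    rw [← h]

theorem pvPairsA_nil_iff (lists : List (List String)) (c : Char) :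
    pvPairsA lists c = [] ↔ pvQ lists (pvK c) = false := by
  simp only [pvPairsA, pvQ, List.flatMap_eq_nil_iff, List.any_eq_false]
  constructor
  · intro h p hp
    cases hcb : p.2.contains (pvK c) with
    | false => decide
    | true => exact absurd (h _ (List.mem_filter.mpr ⟨hp, hcb⟩)) (List.cons_ne_nil _ _)
  · intro h p hp
    exact absurd (List.mem_filter.mp hp).2 (by simpa using h _ (List.mem_filter.mp hp).1)

theorem pvOcc_nil (lists : List (List String)) (s : String)
    (h : pvQ lists s = false) : pvOcc lists s = [] := by
  simp only [pvQ, List.any_eq_false] at h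
  simp only [pvOcc, List.flatMap_eq_nil_iff]
  intro p hp
  have : s ∉ p.2 := by simpa using h p hp
  simp [List.count_eq_zero.mpr this]

-- second components of a pvPairsA block are exactly the occurrence list
theorem pvPairsA_map_snd (lists : List (List String)) (c : Char) :
    (pvPairsA lists c).map (·.2) = pvOcc lists (pvK c) := by
  simp only [pvPairsA, pvOcc, List.map_flatMap]
  have h1 : ∀ p ∈ (PySem.List.enumerate lists 0).filter (fun p => p.2.contains (pvK c)),
      ((pvK c, p.1) :: (PySem.List.pyRange 1 (PySem.List.count p.2 (pvK c) : Int) 1).map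
        (fun _ => (pvK c, p.1))).map (·.2) = List.replicate (p.2.count (pvK c)) p.1 := by
    intro p hp
    have hmem : pvK c ∈ p.2 := by simpa using (List.mem_filter.mp hp).2
    have hpos : 1 ≤ p.2.count (pvK c) := by simpa using List.count_pos_iff.mpr hmem
    rw [List.map_cons, List.map_map]
    show p.1 :: (PySem.List.pyRange 1 (PySem.List.count p.2 (pvK c) : Int) 1).map (fun _ => p.1) = _
    rw [List.map_const', PySem.List.length_pyRange_one, PySem.List.count_eq]
    have : ((p.2.count (pvK c) : Int) - 1).toNat = p.2.count (pvK c) - 1 := by omega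
    rw [this, ← List.replicate_succ]
    congr 1
    omega
  rw [List.flatMap_congr h1]
  refine pvFlatMap_filter_eq _ _ _ (fun p hp hc => ?_)
  have : pvK c ∉ p.2 := by simpa using hc
  simp [List.count_eq_zero.mpr this]

-- A as a flat modify-append fold
theorem pvA_inner (lists : List (List String)) (c : Char) (d : PySem.Dict String (List Int)) :
    (PySem.List.enumerate lists 0).foldl (fun d p =>
      if p.2.contains (String.ofList [c]) then
        (PySem.List.pyRange 1 (PySem.List.count p.2 (String.ofList [c]) : Int) 1).foldl
          (fun d _ => d.modify (String.ofList [c]) [] (fun t => t ++ [p.1]))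
          (d.modify (String.ofList [c]) [] (fun t => t ++ [p.1]))
      else d) d
    = (pvPairsA lists c).foldl pvStep d := by
  rw [PySem.List.foldl_if_eq_foldl_filter]
  rw [pvPairsA, List.foldl_flatMap]
  apply PySem.List.foldl_congr_mem
  intro d p hp
  simp only [List.foldl_cons, List.foldl_map, pvStep, pvK]

theorem pvA_eq (lists : List (List String)) (M : String) :
    create_successor_sequences lists M
      = ((M.toList.flatMap (pvPairsA lists)).foldl pvStep PySem.Dict.empty).items := by
  unfold create_successor_sequences
  rw [List.foldl_flatMap]
  congr 1
  apply PySem.List.foldl_congr_mem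
  intro d c _
  exact pvA_inner lists c d

-- the index dict of B as a flat modify-append fold
theorem pvI_eq (lists : List (List String)) :
    (PySem.List.enumerate lists 0).foldl (fun d p =>
        p.2.foldl (fun d e => d.modify e [] (fun t => t ++ [p.1])) d)
      (PySem.Dict.empty : PySem.Dict String (List Int))
    = (pvPairsI lists).foldl pvStep PySem.Dict.empty := by
  rw [pvPairsI, List.foldl_flatMap]
  apply PySem.List.foldl_congr_mem
  intro d p hp
  simp [pvStep, List.foldl_map]

theorem pvI_getD (lists : List (List String)) (s : String) :
    ((pvPairsI lists).foldl pvStep PySem.Dict.empty).getD s [] = pvOcc lists s := by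
  have : (pvPairsI lists).foldl pvStep PySem.Dict.empty
      = (pvPairsI lists).foldl (fun d x => PySem.Dict.modify d x.1 [] (fun t => t ++ [x.2])) PySem.Dict.empty := rfl
  rw [this, pvFold_getD]
  simp only [PySem.Dict.getD_empty, List.nil_append]
  rw [pvPairsI, List.filter_flatMap]
  rw [List.flatMap_assoc]
  refine List.flatMap_congr (fun p hp => ?_)
  rw [show (List.filter (fun x => x.1 == s) (p.2.map (fun e => (e, p.1)))) = (p.2.filter (fun e => e == s)).map (fun e => (e, p.1)) from by
    simpa using (List.filter_map (l := p.2) (f := fun e => (e, p.1)) (p := fun x => x.1 == s))]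
  rw [pvFlatMap_singleton]
  rw [List.map_map]
  show (p.2.filter (fun e => e == s)).map (fun _ => p.1) = _
  rw [List.map_const', ← List.count_eq_length_filter]

theorem pvI_contains (lists : List (List String)) (s : String) :
    ((pvPairsI lists).foldl pvStep PySem.Dict.empty).contains s = pvQ lists s := by
  have hk : ((pvPairsI lists).foldl pvStep PySem.Dict.empty).keys
      = PySem.Set.update (PySem.Dict.empty : PySem.Dict String (List Int)).keys ((pvPairsI lists).map (·.1)) :=
    PySem.Dict.keys_foldl_modify_key (pvPairsI lists) (·.1) [] (fun d q => fun t => t ++ [q.2]) _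
  have hmem : s ∈ ((pvPairsI lists).foldl pvStep PySem.Dict.empty).keys ↔ pvQ lists s = true := by
    rw [hk]
    rw [PySem.Set.mem_update]
    simp only [PySem.Dict.keys_empty, List.not_mem_nil, false_or]
    simp [pvPairsI, pvQ, List.mem_flatMap, List.any_eq_true]
  by_cases h : pvQ lists s = true
  · rw [h]; exact PySem.Dict.contains_iff_mem_keys _ _ |>.mpr (hmem.mpr h)
  · simp only [Bool.not_eq_true] at h
    rw [h]
    by_contra hc
    simp only [Bool.not_eq_false] at hc
    have := (PySem.Dict.contains_iff_mem_keys _ _).mp hc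
    rw [hmem] at this
    simp [h] at this

-- B with the index facts substituted
theorem pvB_eq (lists : List (List String)) (M : String) :
    create_successor_sequences_alt lists M
      = ((M.toList.foldl (fun r c =>
            if pvQ lists (pvK c) then
              r.modify (pvK c) [] (fun t => t ++ pvOcc lists (pvK c))
            else r) (PySem.Dict.empty : PySem.Dict String (List Int))).items) := by
  simp only [create_successor_sequences_alt, pvI_eq, pvI_contains, pvI_getD, pvK]

-- both key lists coincide
theorem pvKeys_eq (lists : List (List String)) (L : List Char) (s : List String) :
    PySem.Set.update s ((L.flatMap (pvPairsA lists)).map (·.1))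
      = PySem.Set.update s ((L.filter (fun c => pvQ lists (pvK c))).map pvK) := by
  induction L generalizing s with
  | nil => rfl
  | cons c L ih =>
    rw [List.flatMap_cons, List.map_append, List.filter_cons]
    have hupd : ∀ (xs ys : List String), PySem.Set.update s (xs ++ ys) = PySem.Set.update (PySem.Set.update s xs) ys := by
      intro xs ys; simp [PySem.Set.update, List.foldl_append]
    rw [hupd]
    have hconst := pvUpdate_const ((pvPairsA lists c).map (·.1)) s (pvK c)
      (by intro x hx; obtain ⟨q, hq, rfl⟩ := List.mem_map.mp hx; exact pvPairsA_key lists c q hq)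
    by_cases h : pvQ lists (pvK c) = true
    · have hne : pvPairsA lists c ≠ [] := by
        intro hnil; rw [(pvPairsA_nil_iff lists c).mp hnil] at h; simp at h
      have : ((pvPairsA lists c).map (·.1)).isEmpty = false := by
        simp [hne]
      rw [hconst, this, if_neg (by simp)]
      rw [h, if_pos rfl, List.map_cons]
      have : PySem.Set.update s (pvK c :: (L.filter (fun c => pvQ lists (pvK c))).map pvK)
          = PySem.Set.update (PySem.Set.add s (pvK c)) ((L.filter (fun c => pvQ lists (pvK c))).map pvK) := rfl
      rw [this, ih]
    · simp only [Bool.not_eq_true] at h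
      have hnil : pvPairsA lists c = [] := (pvPairsA_nil_iff lists c).mpr h
      rw [hnil, h]
      simp only [List.map_nil, Bool.false_eq_true, if_false]
      have : PySem.Set.update s ([] : List String) = s := rfl
      rw [this, ih]

-- both value lists coincide at every key
theorem pvGetD_eq (lists : List (List String)) (M : String) (c' : String) :
    ((M.toList.flatMap (pvPairsA lists)).foldl pvStep PySem.Dict.empty).getD c' []
      = ((M.toList.filter (fun c => pvQ lists (pvK c))).foldl
          (fun r c => r.modify (pvK c) [] (fun t => t ++ pvOcc lists (pvK c)))
          PySem.Dict.empty).getD c' [] := by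
  have h1 : ((M.toList.flatMap (pvPairsA lists)).foldl pvStep PySem.Dict.empty).getD c' []
      = ((M.toList.flatMap (pvPairsA lists)).filter (fun x => x.1 == c')).flatMap (fun q => [q.2]) := by
    have := pvFold_getD (M.toList.flatMap (pvPairsA lists)) (·.1) (fun q => [q.2]) PySem.Dict.empty c'
    simpa using this
  have h2 : ((M.toList.filter (fun c => pvQ lists (pvK c))).foldl
          (fun r c => r.modify (pvK c) [] (fun t => t ++ pvOcc lists (pvK c)))
          PySem.Dict.empty).getD c' []
      = ((M.toList.filter (fun c => pvQ lists (pvK c))).filter (fun c => pvK c == c')).flatMap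
          (fun c => pvOcc lists (pvK c)) := by
    have := pvFold_getD (M.toList.filter (fun c => pvQ lists (pvK c))) pvK (fun c => pvOcc lists (pvK c)) PySem.Dict.empty c'
    simpa using this
  rw [h1, h2]
  rw [List.filter_flatMap, List.flatMap_assoc]
  rw [List.filter_filter, pvFlatMap_filter]
  refine List.flatMap_congr (fun c hc => ?_)
  have hblk : ((pvPairsA lists c).filter (fun x => x.1 == c')).flatMap (fun q => [q.2])
      = if pvK c == c' then pvOcc lists (pvK c) else [] := by
    by_cases h : (pvK c == c') = true
    · rw [h, if_pos rfl]
      have : (pvPairsA lists c).filter (fun x => x.1 == c') = pvPairsA lists c := by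
        refine List.filter_eq_self.mpr (fun q hq => ?_)
        rw [pvPairsA_key lists c q hq]; exact h
      rw [this, pvFlatMap_singleton, pvPairsA_map_snd]
    · simp only [Bool.not_eq_true] at h
      rw [h, if_neg (by simp)]
      have : (pvPairsA lists c).filter (fun x => x.1 == c') = [] := by
        refine List.filter_eq_nil_iff.mpr (fun q hq => ?_)
        rw [pvPairsA_key lists c q hq]; simp [h]
      rw [this]; rfl
  rw [hblk]
  by_cases hq : pvQ lists (pvK c) = true
  · simp [hq]
  · simp only [Bool.not_eq_true] at hq
    simp [hq, pvOcc_nil lists (pvK c) hq]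

-- ===== VERDICT (by name: the statement is the Claim_ definition above) =====
theorem create_successor_sequences_spec : Claim_equal_create_successor_sequences := by
  intro lists M _
  unfold Spec_create_successor_sequences
  rw [pvA_eq, pvB_eq]
  rw [PySem.List.foldl_if_eq_foldl_filter (p := fun c => pvQ lists (pvK c))
        (f := fun (r : PySem.Dict String (List Int)) (c : Char) =>
          r.modify (pvK c) [] (fun t => t ++ pvOcc lists (pvK c)))]
  -- items via keys and getD
  have hstep : (M.toList.flatMap (pvPairsA lists)).foldl pvStep (PySem.Dict.empty : PySem.Dict String (List Int))
      = (M.toList.flatMap (pvPairsA lists)).foldl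
          (fun (d : PySem.Dict String (List Int)) (q : String × Int) => d.modify q.1 [] (fun t => t ++ [q.2]))
          PySem.Dict.empty := rfl
  rw [hstep]
  have hndA : ((M.toList.flatMap (pvPairsA lists)).foldl
      (fun (d : PySem.Dict String (List Int)) (q : String × Int) => d.modify q.1 [] (fun t => t ++ [q.2]))
      PySem.Dict.empty).keys.Nodup :=
    PySem.Dict.nodup_keys_foldl_modify_key _ (fun (q : String × Int) => q.1) []
      (fun (d : PySem.Dict String (List Int)) (q : String × Int) => fun t => t ++ [q.2]) _ (by simp)
  have hndB : ((M.toList.filter (fun c => pvQ lists (pvK c))).foldl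
      (fun r c => r.modify (pvK c) [] (fun t => t ++ pvOcc lists (pvK c))) PySem.Dict.empty).keys.Nodup :=
    PySem.Dict.nodup_keys_foldl_modify_key _ pvK [] (fun d c => fun t => t ++ pvOcc lists (pvK c)) _ (by simp)
  rw [PySem.Dict.items_eq_map_keys _ hndA ([] : List Int), PySem.Dict.items_eq_map_keys _ hndB ([] : List Int)]
  have hkA : ((M.toList.flatMap (pvPairsA lists)).foldl
      (fun (d : PySem.Dict String (List Int)) (q : String × Int) => d.modify q.1 [] (fun t => t ++ [q.2]))
      PySem.Dict.empty).keys
      = PySem.Set.update ((PySem.Dict.empty : PySem.Dict String (List Int)).keys) ((M.toList.flatMap (pvPairsA lists)).map (fun (q : String × Int) => q.1)) :=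
    PySem.Dict.keys_foldl_modify_key _ (fun (q : String × Int) => q.1) []
      (fun (d : PySem.Dict String (List Int)) (q : String × Int) => fun t => t ++ [q.2]) _
  have hkB : ((M.toList.filter (fun c => pvQ lists (pvK c))).foldl
      (fun r c => r.modify (pvK c) [] (fun t => t ++ pvOcc lists (pvK c))) PySem.Dict.empty).keys
      = PySem.Set.update ((PySem.Dict.empty : PySem.Dict String (List Int)).keys) ((M.toList.filter (fun c => pvQ lists (pvK c))).map pvK) :=
    PySem.Dict.keys_foldl_modify_key _ pvK [] (fun d c => fun t => t ++ pvOcc lists (pvK c)) _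
  have hkeys : ((M.toList.flatMap (pvPairsA lists)).foldl
      (fun (d : PySem.Dict String (List Int)) (q : String × Int) => d.modify q.1 [] (fun t => t ++ [q.2]))
      PySem.Dict.empty).keys
      = ((M.toList.filter (fun c => pvQ lists (pvK c))).foldl
          (fun r c => r.modify (pvK c) [] (fun t => t ++ pvOcc lists (pvK c))) PySem.Dict.empty).keys := by
    rw [hkA, hkB]
    exact pvKeys_eq lists M.toList _
  rw [hkeys]
  refine List.map_congr_left (fun k hk => ?_)
  have := pvGetD_eq lists M k
  rw [show (M.toList.flatMap (pvPairsA lists)).foldl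
      (fun (d : PySem.Dict String (List Int)) (q : String × Int) => d.modify q.1 [] (fun t => t ++ [q.2]))
      PySem.Dict.empty = (M.toList.flatMap (pvPairsA lists)).foldl pvStep PySem.Dict.empty from rfl]
  exact congrArg (Prod.mk k) this
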